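-- pv_equiv track=rewrite | github.com/000specific/GIGANTIC | gigantic_project-COPYME/subprojects/trees_species/BLOCK_permutations_and_features/workflow-COPYME-permutations_and_features/ai/scripts/002_ai-python-generate_topology_permutations.py | canonicalize_newick
-- ===== SOURCE A (Python) =====
-- def canonicalize_newick( newick: str ) -> str:
--     """
--     Canonicalize a Newick string by ensuring all pairs are alphabetically ordered.
--
--     Recursively processes the tree so that in every (X,Y) pair, X comes before Y
--     alphabetically. Creates a unique canonical form for each topological structure.
--     """
--     if '(' not in newick:
--         return newick
--
--     if newick.startswith( '(' ) and newick.endswith( ')' ):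
--         inner = newick[ 1:-1 ]
--
--         depth = 0
--         comma_pos = -1
--         for i, char in enumerate( inner ):
--             if char == '(':
--                 depth += 1
--             elif char == ')':
--                 depth -= 1
--             elif char == ',' and depth == 0:
--                 comma_pos = i
--                 break
--
--         if comma_pos == -1:
--             return newick
--
--         left = inner[ :comma_pos ]
--         right = inner[ comma_pos + 1: ]
--
--         left_canonical = canonicalize_newick( left )
--         right_canonical = canonicalize_newick( right )
--
--         if left_canonical < right_canonical:
--             return f"({left_canonical},{right_canonical})"
--         else:
--             return f"({right_canonical},{left_canonical})"
--
--     return newick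
-- ===== SOURCE B (Python) =====
-- def canonicalize_newick(newick: str) -> str:
--     """Two-stage reimplementation: parse the string once into an explicit binary
--     tree whose leaves keep their exact source text (split point = first comma
--     whose prefix has equally many '(' and ')'), then serialize the tree
--     bottom-up with each pair alphabetically ordered."""
--     return _write(_parse(newick))
--
--
-- def _parse(s):
--     if s.startswith('(') and s.endswith(')'):
--         inner = s[1:-1]
--         i = _split(inner)
--         if i != -1:
--             return (_parse(inner[:i]), _parse(inner[i + 1:]))
--     return s
--
--
-- def _split(inner):
--     # first comma whose prefix is paren-balanced (count of '(' equals count of ')')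
--     return next((i for i, c in enumerate(inner)
--                  if c == ',' and inner[:i].count('(') == inner[:i].count(')')), -1)
--
--
-- def _write(t):
--     if isinstance(t, str):
--         return t
--     a, b = _write(t[0]), _write(t[1])
--     return f"({a},{b})" if a < b else f"({b},{a})"
-- ===== Notes on version B (the rewrite author's own statement) =====
-- stated objective: alternative
-- what changed: B is staged: it first parses the whole string into an explicit binary tree whose leaves keep their exact source text, locating each split point as the first comma whose prefix contains equally many '(' and ')' (a counting criterion, no running depth accumulator), and then serializes the tree bottom-up ordering each pair; A instead interleaves a depth-counter scan, the comparison and the rebuild in one string-slicing recursion.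
import Mathlib
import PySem

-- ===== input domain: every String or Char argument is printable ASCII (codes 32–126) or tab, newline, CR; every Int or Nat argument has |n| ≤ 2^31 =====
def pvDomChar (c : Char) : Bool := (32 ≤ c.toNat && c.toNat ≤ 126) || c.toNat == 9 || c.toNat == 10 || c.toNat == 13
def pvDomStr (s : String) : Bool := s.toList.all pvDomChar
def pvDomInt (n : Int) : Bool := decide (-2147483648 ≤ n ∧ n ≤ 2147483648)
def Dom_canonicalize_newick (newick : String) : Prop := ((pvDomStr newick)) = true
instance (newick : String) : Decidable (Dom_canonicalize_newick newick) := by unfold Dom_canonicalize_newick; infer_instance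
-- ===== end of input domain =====

-- B re-implements A in two stages: parse the string once into an explicit binary tree
-- (leaves keep their exact source text; split point = the first comma whose prefix has
-- equally many '(' and ')'), then serialize the tree bottom-up with each pair ordered.
-- Both recursions carry a fuel argument that only makes them total: the wrappers pass
-- fuel larger than the recursion depth ever reached (each recursive call strictly
-- shrinks its region), so the fuel-exhausted arm is unreachable.

-- ===== PORT A =====
-- A's enumerate/break loop: position of the first depth-0 comma in `inner`, -1 if none
def pvAFind : List Char → Int → Int → Int
  | [], _, _ => -1
  | c :: rest, depth, i =>
    if c = '(' then pvAFind rest (depth + 1) (i + 1)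
    else if c = ')' then pvAFind rest (depth - 1) (i + 1)
    else if c = ',' ∧ depth = 0 then i
    else pvAFind rest depth (i + 1)

def pvACore : Nat → List Char → List Char
  | 0, s => s
  | f + 1, s =>
    if PySem.Chars.isIn ['('] s = false then s
    else if PySem.Chars.startswith s ['('] = true ∧ PySem.Chars.endswith s [')'] = true then
      let inner := PySem.List.slice s (some 1) (some (-1))
      let cp := pvAFind inner 0 0
      if cp = -1 then s
      else
        let lc := pvACore f (PySem.List.slice inner none (some cp))
        let rc := pvACore f (PySem.List.slice inner (some (cp + 1)) none)
        if PySem.Chars.strLt lc rc then '(' :: (lc ++ ',' :: (rc ++ [')']))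
        else '(' :: (rc ++ ',' :: (lc ++ [')']))
    else s

def canonicalize_newick (newick : String) : String :=
  String.ofList (pvACore (newick.toList.length + 1) newick.toList)

-- ===== PORT B =====
-- explicit parse tree: a leaf keeps its exact source text
inductive NTree
  | leaf : List Char → NTree
  | node : NTree → NTree → NTree
deriving DecidableEq, Repr

-- Source B _split: first index i with inner[i] = ',' and inner[:i].count('(') = inner[:i].count(')')
-- (find? over range stands for Python's enumerate: at each i < length, getD i IS the enumerated char)
def pvBSplit (inner : List Char) : Option Nat :=
  List.find? (fun i => inner.getD i ' ' == ',' &&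
      ((inner.take i).count '(' == (inner.take i).count ')')) (List.range inner.length)

-- Source B _parse (inner[:i] / inner[i+1:] with the found index i ≥ 0 are exactly take / drop)
def pvBParse : Nat → List Char → NTree
  | 0, s => .leaf s
  | f + 1, s =>
    if PySem.Chars.startswith s ['('] = true ∧ PySem.Chars.endswith s [')'] = true then
      let inner := PySem.List.slice s (some 1) (some (-1))
      match pvBSplit inner with
      | none => .leaf s
      | some i => .node (pvBParse f (inner.take i)) (pvBParse f (inner.drop (i + 1)))
    else .leaf s

-- Source B _write
def pvBWrite : NTree → List Char
  | .leaf s => s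
  | .node l r =>
    let a := pvBWrite l
    let b := pvBWrite r
    if PySem.Chars.strLt a b then '(' :: (a ++ ',' :: (b ++ [')']))
    else '(' :: (b ++ ',' :: (a ++ [')']))

def canonicalize_newick_alt (newick : String) : String :=
  String.ofList (pvBWrite (pvBParse (newick.toList.length + 1) newick.toList))

-- ===== PRECONDITION & SPEC =====
def Spec_canonicalize_newick (newick : String) (out : String) : Prop := out = canonicalize_newick_alt newick
instance (newick : String) (out : String) : Decidable (Spec_canonicalize_newick newick out) := by unfold Spec_canonicalize_newick; infer_instance

-- ===== CLAIM (what is proved, stated in full; the proofs are below) =====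
def Claim_equal_canonicalize_newick : Prop := ∀ (newick : String), Dom_canonicalize_newick newick → Spec_canonicalize_newick newick (canonicalize_newick newick)

-- ===== LEMMAS AND PROOFS =====

theorem pvAFind_bounds (l : List Char) : ∀ (d i : Int), pvAFind l d i ≠ -1 →
    i ≤ pvAFind l d i ∧ pvAFind l d i < i + l.length := by
  induction l with
  | nil => intro d i h; simp [pvAFind] at h
  | cons c rest ih =>
    intro d i h
    by_cases h1 : c = '('
    · rw [pvAFind, if_pos h1] at h ⊢
      have := ih (d + 1) (i + 1) h; simp only [List.length_cons]; push_cast at this ⊢; omega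
    · by_cases h2 : c = ')'
      · rw [pvAFind, if_neg h1, if_pos h2] at h ⊢
        have := ih (d - 1) (i + 1) h; simp only [List.length_cons]; push_cast at this ⊢; omega
      · by_cases h3 : c = ',' ∧ d = 0
        · rw [pvAFind, if_neg h1, if_neg h2, if_pos h3] at h ⊢
          simp only [List.length_cons]; push_cast; omega
        · rw [pvAFind, if_neg h1, if_neg h2, if_neg h3] at h ⊢
          have := ih d (i + 1) h; simp only [List.length_cons]; push_cast at this ⊢; omega

theorem pvAFind_shift (l : List Char) : ∀ (d a : Int),
    pvAFind l d a = if pvAFind l d 0 = -1 then -1 else pvAFind l d 0 + a := by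
  induction l with
  | nil => intro d a; simp [pvAFind]
  | cons c rest ih =>
    intro d a
    by_cases h1 : c = '('
    · rw [pvAFind, if_pos h1, pvAFind, if_pos h1, ih (d + 1) (a + 1), ih (d + 1) (0 + 1)]
      rcases eq_or_ne (pvAFind rest (d + 1) 0) (-1) with hr | hr
      · simp [hr]
      · have hb := (pvAFind_bounds rest (d + 1) 0 hr).1
        split_ifs <;> omega
    · by_cases h2 : c = ')'
      · rw [pvAFind, if_neg h1, if_pos h2, pvAFind, if_neg h1, if_pos h2,
            ih (d - 1) (a + 1), ih (d - 1) (0 + 1)]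
        rcases eq_or_ne (pvAFind rest (d - 1) 0) (-1) with hr | hr
        · simp [hr]
        · have hb := (pvAFind_bounds rest (d - 1) 0 hr).1
          split_ifs <;> omega
      · by_cases h3 : c = ',' ∧ d = 0
        · rw [pvAFind, if_neg h1, if_neg h2, if_pos h3, pvAFind, if_neg h1, if_neg h2, if_pos h3]
          norm_num
        · rw [pvAFind, if_neg h1, if_neg h2, if_neg h3, pvAFind, if_neg h1, if_neg h2, if_neg h3,
              ih d (a + 1), ih d (0 + 1)]
          rcases eq_or_ne (pvAFind rest d 0) (-1) with hr | hr
          · simp [hr]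
          · have hb := (pvAFind_bounds rest d 0 hr).1
            split_ifs <;> omega

-- the predicate of B's split, generalized over a starting depth d
def pvP (l : List Char) (d : Int) (i : Nat) : Bool :=
  l.getD i ' ' == ',' && decide ((((l.take i).count '(' : Int) - ((l.take i).count ')' : Int)) = -d)

theorem pvP_succ (c : Char) (rest : List Char) (d : Int) :
    (pvP (c :: rest) d) ∘ Nat.succ =
      pvP rest (d + (if c = '(' then 1 else 0) - (if c = ')' then 1 else 0)) := by
  funext i
  simp only [Function.comp, pvP, List.getD_cons_succ, List.take_succ_cons, List.count_cons]
  congr 1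
  by_cases h1 : c = '(' <;> by_cases h2 : c = ')' <;>
    simp [h1, h2] <;> constructor <;> intro h <;> omega

-- the split correspondence: A's depth-counter scan, started at depth d, finds exactly the
-- first comma whose prefix paren-balance equals -d
theorem pvSplit_gen (inner : List Char) : ∀ (d : Int),
    pvAFind inner d 0 =
      (match List.find? (pvP inner d) (List.range inner.length) with
       | none => -1
       | some i => (i : Int)) := by
  induction inner with
  | nil => intro d; simp [pvAFind]
  | cons c rest ih =>
    intro d
    have hrange : List.range (c :: rest).length = 0 :: (List.range rest.length).map Nat.succ := by
      simp [List.range_succ_eq_map]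
    rw [hrange]
    have hmap : List.find? (pvP (c :: rest) d) ((List.range rest.length).map Nat.succ)
        = (List.find? ((pvP (c :: rest) d) ∘ Nat.succ) (List.range rest.length)).map Nat.succ := by
      rw [List.find?_map]
    have hbranch : ∀ (d' : Int),
        pvAFind rest d' (0 + 1) =
          (match (List.find? (pvP rest d') (List.range rest.length)).map Nat.succ with
           | none => -1
           | some i => (i : Int)) := by
      intro d'
      rw [pvAFind_shift rest d' (0 + 1), ih d']
      cases hfind : List.find? (pvP rest d') (List.range rest.length) with
      | none => simp
      | some i =>
        simp only [Option.map_some]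
        rw [if_neg (by omega : ¬ (i : Int) = -1)]
        push_cast [Nat.succ_eq_add_one]; ring
    by_cases h1 : c = '('
    · have hp0 : pvP (c :: rest) d 0 = false := by simp [pvP, h1]
      rw [List.find?_cons_of_neg (by simp [hp0]), hmap, pvP_succ, pvAFind, if_pos h1, h1]
      simp only [if_neg (by decide : ¬'(' = ')'), sub_zero]
      norm_num
      exact hbranch (d + 1)
    · by_cases h2 : c = ')'
      · have hp0 : pvP (c :: rest) d 0 = false := by simp [pvP, h2]
        rw [List.find?_cons_of_neg (by simp [hp0]), hmap, pvP_succ, pvAFind, if_neg h1, if_pos h2, h2]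
        simp only [if_neg (by decide : ¬')' = '('), add_zero]
        norm_num
        exact hbranch (d - 1)
      · by_cases h3 : c = ',' ∧ d = 0
        · have hp0 : pvP (c :: rest) d 0 = true := by simp [pvP, h3.1, h3.2]
          rw [List.find?_cons_of_pos hp0, pvAFind, if_neg h1, if_neg h2, if_pos h3]
          simp
        · have hp0 : pvP (c :: rest) d 0 = false := by
            by_cases hc : c = ','
            · have hd : d ≠ 0 := fun hd => h3 ⟨hc, hd⟩
              simp [pvP, hc]; omega
            · simp [pvP, hc]
          rw [List.find?_cons_of_neg (by simp [hp0]), hmap, pvP_succ, pvAFind,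
              if_neg h1, if_neg h2, if_neg h3]
          simp only [if_neg h1, if_neg h2, add_zero, sub_zero]
          exact hbranch d

-- B's Bool predicate at d = 0 is that balance criterion
theorem pvBSplit_eq (inner : List Char) :
    pvBSplit inner = List.find? (pvP inner 0) (List.range inner.length) := by
  unfold pvBSplit
  congr 1
  funext i
  simp [pvP, sub_eq_zero, Bool.beq_eq_decide_eq]

-- the two recursions descend in lockstep: writing B's parse tree is A's recursion
theorem pvParseWrite (f : Nat) : ∀ (s : List Char), pvBWrite (pvBParse f s) = pvACore f s := by
  induction f with
  | zero => intro s; rw [pvBParse, pvBWrite, pvACore]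
  | succ f ih =>
    intro s
    by_cases hg : PySem.Chars.startswith s ['('] = true ∧ PySem.Chars.endswith s [')'] = true
    · rcases (PySem.Chars.startswith_iff s ['(']).1 hg.1 with ⟨t, ht⟩
      have hisin : PySem.Chars.isIn ['('] s = true := by
        rw [← ht]
        exact (PySem.Chars.isIn_iff_infix _ _).2 (List.IsPrefix.isInfix ⟨t, rfl⟩)
      rw [pvBParse, if_pos hg, pvACore, if_neg (by rw [hisin]; simp), if_pos hg]
      simp only []
      have hsplit := pvBSplit_eq (PySem.List.slice s (some 1) (some (-1)))
      have hgen := pvSplit_gen (PySem.List.slice s (some 1) (some (-1))) 0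
      cases hfind : pvBSplit (PySem.List.slice s (some 1) (some (-1))) with
      | none =>
        have hcp : pvAFind (PySem.List.slice s (some 1) (some (-1))) 0 0 = -1 := by
          rw [hgen, ← hsplit, hfind]
        rw [if_pos hcp, pvBWrite]
      | some i =>
        have hcp : pvAFind (PySem.List.slice s (some 1) (some (-1))) 0 0 = (i : Int) := by
          rw [hgen, ← hsplit, hfind]
        rw [hcp, if_neg (by omega : ¬ (i : Int) = -1), pvBWrite]
        rw [PySem.List.slice_to _ (by omega : (0:Int) ≤ (i : Int)),
            PySem.List.slice_from _ (by omega : (0:Int) ≤ (i : Int) + 1),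
            (by omega : ((i : Int) + 1).toNat = i + 1),
            (by omega : ((i : Int)).toNat = i),
            ih, ih]
    · rw [pvBParse, if_neg hg, pvBWrite, pvACore]
      rcases eq_or_ne (PySem.Chars.isIn ['('] s) false with hin | hin
      · rw [if_pos hin]
      · rw [if_neg hin, if_neg hg]

-- ===== VERDICT (by name: the statement is the Claim_ definition above) =====
theorem canonicalize_newick_spec : Claim_equal_canonicalize_newick := by
  intro newick _
  unfold Spec_canonicalize_newick canonicalize_newick canonicalize_newick_alt
  rw [pvParseWrite]
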